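-- pv_equiv track=rewrite | github.com/dbgarcia95/calculus-calculator | calculus.py | analyzeTerms
-- ===== SOURCE A (Python) =====
-- def findTerms(exp):
-- #Takes an expression and splits it into its individual terms
--     plusArr=exp.split('+')
--     #Splits 2x^2-5x+3 into ['2x^2-5x', '3']
--     minusArr=[]
--     fullArr=[]
--
--     for term in plusArr:
--         if '-' in term:
--         #Creates an array of the terms not caught by the previous split ['2x^2-5x', '3']==>['2x^2', '5x']
--             secondArray=term.split('-')
--             for i in secondArray:
--                 minusArr.append(i)
--         else:
--         #Start adding to the full list of terms
--             fullArr.append(term)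
--
--     for term in minusArr:
--         fullArr.append(term)
--     return fullArr
--
-- def analyzeTerms(exp):
-- #Extract a term's coefficient, variable, and exponent for future manipulation
-- #Then sorts in descending exponential order
--     terms=findTerms(exp)
--     dissectedTermArray=[]
--     coString=''
--     exponent=''
--     sortedTermArray=[]
--     raisedTermArray=[]
--     def basicPolySort(i):
--         return int(i[2])
--
--     for term in terms:
--         dissectedTerm=[]
--         if 'x' not in term:
--         #Checks if term is only an integer
--             dissectedTerm=[term]
--         elif '^' not in term and 'x' in term:
--         #Checks if term contains only a first-power variable
--             if 'x'==term[0]: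
--                 coString='1'
--             #When no coefficient is written, sets it equal to 1
--             else:
--                 coString=term[:term.index('x')]
--
--             dissectedTerm.append(coString)
--             dissectedTerm.append('x')
--
--         elif 'x' in term and '^' in term:
--         #Dissects exponential terms
--             if 'x'==term[0]:
--                 coString='1'
--             else:
--                 coString=term[:term.index('x')]
--
--             dissectedTerm.append(coString)
--             dissectedTerm.append('x')
--             exponent=term[term.index('^')+1:]
--             dissectedTerm.append(exponent)
--         dissectedTermArray.append(dissectedTerm)
--
--     for term in dissectedTermArray:
--         if len(term)==3:
--             raisedTermArray.append(term)
--
--     raisedTermArray.sort(key=basicPolySort, reverse=True)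
--     #Sorts the terms in traditional descending polynomial order
--     for term in raisedTermArray:
--         sortedTermArray.append(term)
--     for term in dissectedTermArray:
--         if len(term)==2:
--             sortedTermArray.append(term)
--     for term in dissectedTermArray:
--         if len(term)==1:
--             sortedTermArray.append(term)
--
--     return sortedTermArray
-- ===== SOURCE B (Python) =====
-- def findTerms(exp):
-- #Takes an expression and splits it into its individual terms
--     plusArr=exp.split('+')
--     minusArr=[]
--     fullArr=[]
--
--     for term in plusArr:
--         if '-' in term:
--             secondArray=term.split('-')
--             for i in secondArray:
--                 minusArr.append(i)
--         else:
--             fullArr.append(term)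
--
--     for term in minusArr:
--         fullArr.append(term)
--     return fullArr
--
-- def analyzeTerms(exp):
-- #Dissect every term, then obtain the final order with ONE stable sort of the
-- #whole list under a composite key: raised terms rank (1, exponent), the rest
-- #(0, length), descending -- stability keeps linear before constant terms and
-- #preserves original order inside each tie class.
--     def dissect(term):
--         if 'x' not in term:
--             return [term]
--         co = '1' if term.startswith('x') else term[:term.index('x')]
--         if '^' in term:
--             return [co, 'x', term[term.index('^')+1:]]
--         return [co, 'x']
--     def rank(t):
--         return (1, int(t[2])) if len(t) == 3 else (0, len(t))
--     return sorted((dissect(t) for t in findTerms(exp)), key=rank, reverse=True)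
-- ===== Notes on version B (the rewrite author's own statement) =====
-- stated objective: alternative
-- what changed: analyzeTerms no longer builds a dissected array and then reorders it with three length-filter passes plus a sort of the raised subset; B dissects each term and produces the final order with ONE stable sort of the whole list under a composite key ((1,int(exp)) for raised terms, (0,len) otherwise, descending), relying on sort stability instead of bucketing/filtering.
import Mathlib
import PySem

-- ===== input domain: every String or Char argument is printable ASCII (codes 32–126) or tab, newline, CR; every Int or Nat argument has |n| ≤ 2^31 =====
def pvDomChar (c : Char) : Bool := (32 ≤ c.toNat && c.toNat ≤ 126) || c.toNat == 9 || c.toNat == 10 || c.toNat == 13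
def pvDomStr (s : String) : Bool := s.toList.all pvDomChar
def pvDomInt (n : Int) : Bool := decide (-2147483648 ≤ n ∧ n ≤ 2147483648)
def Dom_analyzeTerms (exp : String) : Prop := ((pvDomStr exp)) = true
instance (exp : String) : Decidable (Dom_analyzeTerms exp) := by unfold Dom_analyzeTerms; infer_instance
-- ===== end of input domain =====

-- B replaces A's build-then-three-length-filter-passes-plus-partial-sort aggregation by a
-- single stable sort of all dissected terms under a composite key (objective: alternative).

-- ===== PORT A =====
-- findTerms, shared verbatim by both Pythons (identical in Source A and Source B)
def findTermsPort (exp : List Char) : List (List Char) :=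
  let plusArr := PySem.Chars.splitOn exp ['+']
  let fm := plusArr.foldl
    (fun (acc : List (List Char) × List (List Char)) term =>
      if PySem.Chars.isIn ['-'] term then
        -- secondArray = term.split('-'); for i in secondArray: minusArr.append(i)
        (acc.1, (PySem.Chars.splitOn term ['-']).foldl (fun m i => m ++ [i]) acc.2)
      else
        (acc.1 ++ [term], acc.2))
    ([], [])
  -- for term in minusArr: fullArr.append(term)
  fm.2.foldl (fun f t => f ++ [t]) fm.1

-- basicPolySort / int(i[2]) as A's sort key. Under Pre_ the parse succeeds, so the
-- getD 0 default is never the value Python raises on.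
def pvKey (i : List String) : Int := (PySem.Int.ofStr? (i.getD 2 "")).getD 0

def analyzeTerms (exp : String) : List (List String) :=
  let terms := findTermsPort exp.toList
  let dissectedTermArray := terms.foldl
    (fun acc term =>
      let dissectedTerm : List String :=
        if !(PySem.Chars.isIn ['x'] term) then
          [String.ofList term]
        else if !(PySem.Chars.isIn ['^'] term) && PySem.Chars.isIn ['x'] term then
          -- term.index('x') = find (never raises here since 'x' in term)
          let coString := if PySem.List.pyGet? term 0 == some 'x' then "1"
            else String.ofList (PySem.List.slice term none (some (PySem.Chars.find term ['x'])))
          [coString, "x"]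
        else
          let coString := if PySem.List.pyGet? term 0 == some 'x' then "1"
            else String.ofList (PySem.List.slice term none (some (PySem.Chars.find term ['x'])))
          let exponent := String.ofList (PySem.List.slice term (some (PySem.Chars.find term ['^'] + 1)) none)
          [coString, "x", exponent]
      acc ++ [dissectedTerm])
    []
  let raisedTermArray := dissectedTermArray.foldl
    (fun acc t => if t.length == 3 then acc ++ [t] else acc) []
  let raisedSorted := PySem.List.sorted raisedTermArray pvKey true
  let s1 := raisedSorted.foldl (fun acc t => acc ++ [t]) []
  let s2 := dissectedTermArray.foldl (fun acc t => if t.length == 2 then acc ++ [t] else acc) s1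
  dissectedTermArray.foldl (fun acc t => if t.length == 1 then acc ++ [t] else acc) s2

-- ===== PORT B =====
-- B's dissect helper: co = '1' if term.startswith('x') else term[:term.index('x')]
def pvDissectB (term : List Char) : List String :=
  if !(PySem.Chars.isIn ['x'] term) then
    [String.ofList term]
  else
    let co := if PySem.Chars.startswith term ['x'] then "1"
      else String.ofList (PySem.List.slice term none (some (PySem.Chars.find term ['x'])))
    if PySem.Chars.isIn ['^'] term then
      [co, "x", String.ofList (PySem.List.slice term (some (PySem.Chars.find term ['^'] + 1)) none)]
    else
      [co, "x"]

-- B's rank(t) = (1, int(t[2])) if len(t)==3 else (0, len(t)), as the two key components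
def pvK1 (t : List String) : Int := if t.length == 3 then 1 else 0
def pvK2 (t : List String) : Int := if t.length == 3 then pvKey t else (t.length : Int)

def analyzeTerms_alt (exp : String) : List (List String) :=
  PySem.List.sorted2 ((findTermsPort exp.toList).map pvDissectB) pvK1 pvK2 true

-- ===== PRECONDITION & SPEC =====
-- the individual terms of exp: split on '+', then split the '-'-containing pieces on '-'
def pvPieces (exp : String) : List (List Char) :=
  (PySem.Chars.splitOn exp.toList ['+']).flatMap
    (fun t => if PySem.Chars.isIn ['-'] t then PySem.Chars.splitOn t ['-'] else [t])

-- Pre_ excludes exactly the inputs on which BOTH Pythons raise ValueError: a term containing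
-- both 'x' and '^' whose exponent substring (after the first '^') is not a Python int literal.
def Pre_analyzeTerms (exp : String) : Prop :=
  ∀ p ∈ pvPieces exp,
    PySem.Chars.isIn ['x'] p = true → PySem.Chars.isIn ['^'] p = true →
    (PySem.Int.ofChars? (PySem.List.slice p (some (PySem.Chars.find p ['^'] + 1)) none)).isSome = true

instance (exp : String) : Decidable (Pre_analyzeTerms exp) := by
  unfold Pre_analyzeTerms; infer_instance

def pvWitness_analyzeTerms : String := "2x^2-5x+3"

def Spec_analyzeTerms (exp : String) (out : List (List String)) : Prop := out = analyzeTerms_alt exp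
instance (exp : String) (out : List (List String)) : Decidable (Spec_analyzeTerms exp out) := by
  unfold Spec_analyzeTerms; infer_instance

-- ===== CLAIM (what is proved, stated in full; the proofs are below) =====
def Claim_equal_analyzeTerms : Prop :=
  ∀ (exp : String), Dom_analyzeTerms exp → Pre_analyzeTerms exp →
    Spec_analyzeTerms exp (analyzeTerms exp)

-- ===== LEMMAS AND PROOFS =====

-- the value A's dissection loop appends for one term (the loop body, verbatim)
@[reducible] def pvDissect (term : List Char) : List String :=
  if !(PySem.Chars.isIn ['x'] term) then
    [String.ofList term]
  else if !(PySem.Chars.isIn ['^'] term) && PySem.Chars.isIn ['x'] term then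
    let coString := if PySem.List.pyGet? term 0 == some 'x' then "1"
      else String.ofList (PySem.List.slice term none (some (PySem.Chars.find term ['x'])))
    [coString, "x"]
  else
    let coString := if PySem.List.pyGet? term 0 == some 'x' then "1"
      else String.ofList (PySem.List.slice term none (some (PySem.Chars.find term ['x'])))
    let exponent := String.ofList (PySem.List.slice term (some (PySem.Chars.find term ['^'] + 1)) none)
    [coString, "x", exponent]

-- the three dissected shapes
def pvCoef (term : List Char) : String :=
  if PySem.List.pyGet? term 0 == some 'x' then "1"
  else String.ofList (PySem.List.slice term none (some (PySem.Chars.find term ['x'])))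
def pvG3 (term : List Char) : List String :=
  [pvCoef term, "x", String.ofList (PySem.List.slice term (some (PySem.Chars.find term ['^'] + 1)) none)]
def pvG2 (term : List Char) : List String := [pvCoef term, "x"]
def pvG1 (term : List Char) : List String := [String.ofList term]

theorem pvA_closed (exp : String) :
    analyzeTerms exp =
      PySem.List.sorted
        (((findTermsPort exp.toList).map pvDissect).filter (fun t => t.length == 3)) pvKey true
      ++ ((findTermsPort exp.toList).map pvDissect).filter (fun t => t.length == 2)
      ++ ((findTermsPort exp.toList).map pvDissect).filter (fun t => t.length == 1) := by
  simp only [analyzeTerms]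
  rw [PySem.List.foldl_append_singleton_eq_map (f := pvDissect)]
  simp only [PySem.List.foldl_append_singleton_eq_self, PySem.List.foldl_append_if_eq_filter,
    List.nil_append, List.append_assoc]

theorem pvFilter3 (T : List (List Char)) :
    (T.map pvDissect).filter (fun t => t.length == 3)
      = (T.filter (fun t => PySem.Chars.isIn ['x'] t && PySem.Chars.isIn ['^'] t)).map pvG3 := by
  induction T with
  | nil => simp
  | cons t T ih =>
    by_cases hx : PySem.Chars.isIn ['x'] t = true <;>
      by_cases hc : PySem.Chars.isIn ['^'] t = true <;>
        simp [hx, hc, ih, pvDissect, pvG3, pvCoef]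

theorem pvFilter2 (T : List (List Char)) :
    (T.map pvDissect).filter (fun t => t.length == 2)
      = (T.filter (fun t => PySem.Chars.isIn ['x'] t && !PySem.Chars.isIn ['^'] t)).map pvG2 := by
  induction T with
  | nil => simp
  | cons t T ih =>
    by_cases hx : PySem.Chars.isIn ['x'] t = true <;>
      by_cases hc : PySem.Chars.isIn ['^'] t = true <;>
        simp [hx, hc, ih, pvDissect, pvG2, pvCoef]

theorem pvFilter1 (T : List (List Char)) :
    (T.map pvDissect).filter (fun t => t.length == 1)
      = (T.filter (fun t => !PySem.Chars.isIn ['x'] t)).map pvG1 := by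
  induction T with
  | nil => simp
  | cons t T ih =>
    by_cases hx : PySem.Chars.isIn ['x'] t = true <;>
      by_cases hc : PySem.Chars.isIn ['^'] t = true <;>
        simp [hx, hc, ih, pvDissect, pvG1]

-- B's dissect produces exactly A's three shapes (startswith 'x' ↔ term[0]=='x' on a
-- term containing 'x', hence nonempty)
theorem pvStarts (t : List Char) (hx : PySem.Chars.isIn ['x'] t = true) :
    PySem.Chars.startswith t ['x'] = (PySem.List.pyGet? t 0 == some 'x') := by
  cases t with
  | nil => exact absurd hx (by decide)
  | cons c cs => simp [PySem.Chars.startswith, List.isPrefixOf, PySem.List.pyGet?, PySem.List.pyIdx?, eq_comm]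

theorem pvDissectB_3 (t : List Char) (hx : PySem.Chars.isIn ['x'] t = true)
    (hc : PySem.Chars.isIn ['^'] t = true) : pvDissectB t = pvG3 t := by
  simp [pvDissectB, pvG3, pvCoef, hx, hc, pvStarts t hx]

theorem pvDissectB_2 (t : List Char) (hx : PySem.Chars.isIn ['x'] t = true)
    (hc : PySem.Chars.isIn ['^'] t = false) : pvDissectB t = pvG2 t := by
  simp [pvDissectB, pvG2, pvCoef, hx, hc, pvStarts t hx]

theorem pvDissectB_1 (t : List Char) (hx : PySem.Chars.isIn ['x'] t = false) :
    pvDissectB t = pvG1 t := by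
  simp [pvDissectB, pvG1, hx]

-- the 'before' predicate sorted2 … true folds with, and the raised-only one of A's sort
def pvBefore2 (a b : List String) : Bool :=
  decide (pvK1 b < pvK1 a) || (!decide (pvK1 a < pvK1 b) && decide (pvK2 b < pvK2 a))
def pvBeforeR (a b : List String) : Bool := decide (pvKey b < pvKey a)

theorem pvSorted2_eq (xs : List (List String)) :
    PySem.List.sorted2 xs pvK1 pvK2 true
      = xs.foldl (fun acc x => PySem.List.insertBy pvBefore2 x acc) [] := rfl

-- comparisons between the three shapes, by length
theorem pvB2_33 (a b : List String) (ha : a.length = 3) (hb : b.length = 3) :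
    pvBefore2 a b = pvBeforeR a b := by simp [pvBefore2, pvBeforeR, pvK1, pvK2, ha, hb]

theorem pvB2_3low (a b : List String) (ha : a.length = 3) (hb : b.length = 2 ∨ b.length = 1) :
    pvBefore2 a b = true := by
  rcases hb with hb | hb <;> simp [pvBefore2, pvK1, pvK2, ha, hb]

theorem pvB2_2 (a b : List String) (ha : a.length = 2)
    (hb : b.length = 3 ∨ b.length = 2 ∨ b.length = 1) :
    pvBefore2 a b = decide (b.length = 1) := by
  rcases hb with hb | hb | hb <;> simp [pvBefore2, pvK1, pvK2, ha, hb]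

theorem pvB2_1 (a b : List String) (ha : a.length = 1)
    (hb : b.length = 3 ∨ b.length = 2 ∨ b.length = 1) :
    pvBefore2 a b = false := by
  rcases hb with hb | hb | hb <;> simp [pvBefore2, pvK1, pvK2, ha, hb]

-- insertion into a concatenation (facts specific to this file's bucketed accumulator)
theorem pvInsert_all {α : Type} (before : α → α → Bool) (x : α) (ys zs : List α)
    (h : ∀ z ∈ zs, before x z = true) :
    PySem.List.insertBy before x (ys ++ zs) = PySem.List.insertBy before x ys ++ zs := by
  induction ys with
  | nil =>
    cases zs with
    | nil => rfl
    | cons z zs => simp [PySem.List.insertBy, h z (by simp)]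
  | cons y ys ih =>
    by_cases hy : before x y = true <;> simp [PySem.List.insertBy, hy, ih]

theorem pvInsert_none {α : Type} (before : α → α → Bool) (x : α) (ys zs : List α)
    (h : ∀ y ∈ ys, before x y = false) :
    PySem.List.insertBy before x (ys ++ zs) = ys ++ PySem.List.insertBy before x zs := by
  induction ys with
  | nil => rfl
  | cons y ys ih =>
    simp only [List.cons_append, PySem.List.insertBy, h y (by simp)]
    simp only [Bool.false_eq_true, if_false, List.cons.injEq, true_and]
    exact ih (fun y hy => h y (by simp [hy]))

theorem pvInsert_congr {α : Type} (before before' : α → α → Bool) (x : α) (ys : List α)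
    (h : ∀ y ∈ ys, before x y = before' x y) :
    PySem.List.insertBy before x ys = PySem.List.insertBy before' x ys := by
  induction ys with
  | nil => rfl
  | cons y ys ih =>
    simp only [PySem.List.insertBy, h y (by simp)]
    by_cases hy : before' x y = true <;>
      simp [hy, ih (fun y hy => h y (by simp [hy]))]

-- the invariant: folding B's single insertion sort over the dissected terms keeps the
-- accumulator in the form  (raised, insertion-sorted) ++ linear ++ constant
theorem pvFoldB (T : List (List Char)) (R L C : List (List String))
    (hR : ∀ r ∈ R, r.length = 3) (hL : ∀ l ∈ L, l.length = 2) (hC : ∀ c ∈ C, c.length = 1) :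
    T.foldl (fun acc t => PySem.List.insertBy pvBefore2 (pvDissectB t) acc) (R ++ L ++ C)
    = ((T.filter (fun t => PySem.Chars.isIn ['x'] t && PySem.Chars.isIn ['^'] t)).map pvG3).foldl
        (fun acc r => PySem.List.insertBy pvBeforeR r acc) R
      ++ (L ++ (T.filter (fun t => PySem.Chars.isIn ['x'] t && !PySem.Chars.isIn ['^'] t)).map pvG2)
      ++ (C ++ (T.filter (fun t => !PySem.Chars.isIn ['x'] t)).map pvG1) := by
  induction T generalizing R L C with
  | nil => simp
  | cons t T ih =>
    rw [List.foldl_cons]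
    by_cases hx : PySem.Chars.isIn ['x'] t = true
    · by_cases hc : PySem.Chars.isIn ['^'] t = true
      · -- raised term: inserted inside the R segment, by the raised-only comparison
        have hstep : PySem.List.insertBy pvBefore2 (pvDissectB t) (R ++ L ++ C)
            = PySem.List.insertBy pvBeforeR (pvG3 t) R ++ L ++ C := by
          rw [pvDissectB_3 t hx hc, List.append_assoc,
            pvInsert_all pvBefore2 (pvG3 t) R (L ++ C) (by
              intro z hz
              rcases List.mem_append.mp hz with hz | hz
              · exact pvB2_3low _ _ rfl (Or.inl (hL z hz))
              · exact pvB2_3low _ _ rfl (Or.inr (hC z hz))),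
            pvInsert_congr pvBefore2 pvBeforeR (pvG3 t) R
              (fun y hy => pvB2_33 _ _ rfl (hR y hy)), ← List.append_assoc]
        rw [hstep, ih (PySem.List.insertBy pvBeforeR (pvG3 t) R) L C
          (by
            intro r hr
            rcases (PySem.List.mem_insertBy _ _ _ _).mp hr with hr | hr
            · subst hr; rfl
            · exact hR r hr) hL hC]
        simp [hx, hc]
      · -- linear term: appended at the end of the L segment
        have hstep : PySem.List.insertBy pvBefore2 (pvDissectB t) (R ++ L ++ C)
            = R ++ (L ++ [pvG2 t]) ++ C := by
          have hc' : PySem.Chars.isIn ['^'] t = false := by simpa using hc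
          rw [pvDissectB_2 t hx hc', List.append_assoc,
            pvInsert_none pvBefore2 (pvG2 t) R (L ++ C)
              (fun y hy => by rw [pvB2_2 (pvG2 t) y rfl (Or.inl (hR y hy)), hR y hy]; decide),
            pvInsert_all pvBefore2 (pvG2 t) L C
              (fun z hz => by rw [pvB2_2 (pvG2 t) z rfl (Or.inr (Or.inr (hC z hz))), hC z hz]; decide),
            PySem.List.insertBy_of_forall_not_before pvBefore2 (pvG2 t) L
              (fun y hy => by rw [pvB2_2 (pvG2 t) y rfl (Or.inr (Or.inl (hL y hy))), hL y hy]; decide)]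
          simp
        rw [hstep, ih R (L ++ [pvG2 t]) C hR
          (by
            intro l hl
            rcases List.mem_append.mp hl with hl | hl
            · exact hL l hl
            · simp at hl; subst hl; rfl) hC]
        simp [hx, hc]
    · -- constant term: appended at the very end
      have hstep : PySem.List.insertBy pvBefore2 (pvDissectB t) (R ++ L ++ C)
          = R ++ L ++ (C ++ [pvG1 t]) := by
        have hx' : PySem.Chars.isIn ['x'] t = false := by simpa using hx
        rw [pvDissectB_1 t hx', List.append_assoc,
          pvInsert_none pvBefore2 (pvG1 t) R (L ++ C)
            (fun y hy => pvB2_1 _ _ rfl (Or.inl (hR y hy))),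
          pvInsert_none pvBefore2 (pvG1 t) L C
            (fun y hy => pvB2_1 _ _ rfl (Or.inr (Or.inl (hL y hy)))),
          PySem.List.insertBy_of_forall_not_before pvBefore2 (pvG1 t) C
            (fun y hy => pvB2_1 _ _ rfl (Or.inr (Or.inr (hC y hy))))]
        simp
      rw [hstep, ih R L (C ++ [pvG1 t]) hR hL
        (by
          intro c hc'
          rcases List.mem_append.mp hc' with hc' | hc'
          · exact hC c hc'
          · simp at hc'; subst hc'; rfl)]
      simp [hx]

-- ===== VERDICT (by name: the statement is the Claim_ definition above) =====
theorem analyzeTerms_spec : Claim_equal_analyzeTerms := by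
  intro exp _ _
  unfold Spec_analyzeTerms
  rw [pvA_closed, pvFilter3, pvFilter2, pvFilter1]
  show _ = analyzeTerms_alt exp
  unfold analyzeTerms_alt
  rw [pvSorted2_eq, List.foldl_map]
  have h := pvFoldB (findTermsPort exp.toList) [] [] [] (by simp) (by simp) (by simp)
  simp only [List.nil_append, List.append_nil] at h
  rw [h, PySem.List.sorted_rev_eq_foldl_insertBy]
  rfl
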